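-- pv_equiv track=rewrite | github.com/HarveyXYZ/TECF_CGED | labelResultProcess.py | redunW1W2
-- ===== SOURCE A (Python) =====
-- def redunW1W2(chars, tags):
--     assert(len(chars)==len(tags))
--
--     W1Str = ''
--     W2Str = ''
--     for index in range(len(tags)):
--         if tags[index]=='W1':
--             W1Str = W1Str + chars[index]
--         if tags[index]=='W2':
--             W2Str = W2Str + chars[index]
--
--     if W1Str==W2Str:
--         for index in range(len(tags)):
--             if tags[index] == 'W1':
--                 tags[index] = 'O'
--             if tags[index] == 'W2':
--                 tags[index] = 'D'
--
--     return tags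
-- ===== SOURCE B (Python) =====
-- def redunW1W2(chars, tags):
--     assert(len(chars)==len(tags))
--
--     # Stream the W1 and W2 character sequences lazily and compare them
--     # element-by-element with early exit; never build the two strings.
--     it1 = (c for ch, t in zip(chars, tags) if t == 'W1' for c in ch)
--     it2 = (c for ch, t in zip(chars, tags) if t == 'W2' for c in ch)
--     _END = object()
--     while True:
--         a = next(it1, _END)
--         b = next(it2, _END)
--         if a is _END or b is _END:
--             equal = a is b
--             break
--         if a != b:
--             equal = False
--             break
--
--     if equal:
--         return ['O' if t == 'W1' else 'D' if t == 'W2' else t for t in tags]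
--     return tags
-- ===== Notes on version B (the rewrite author's own statement) =====
-- stated objective: alternative
-- what changed: B never builds the two strings: it compares the W1 and W2 character streams lazily via two generators with element-wise early exit, and on equality returns a freshly mapped tag list (comprehension) instead of A's build-both-strings-then-compare and in-place rescan-and-rewrite passes; note A mutates tags in place while B returns a new list, so equivalence is about the return value.
import Mathlib
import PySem

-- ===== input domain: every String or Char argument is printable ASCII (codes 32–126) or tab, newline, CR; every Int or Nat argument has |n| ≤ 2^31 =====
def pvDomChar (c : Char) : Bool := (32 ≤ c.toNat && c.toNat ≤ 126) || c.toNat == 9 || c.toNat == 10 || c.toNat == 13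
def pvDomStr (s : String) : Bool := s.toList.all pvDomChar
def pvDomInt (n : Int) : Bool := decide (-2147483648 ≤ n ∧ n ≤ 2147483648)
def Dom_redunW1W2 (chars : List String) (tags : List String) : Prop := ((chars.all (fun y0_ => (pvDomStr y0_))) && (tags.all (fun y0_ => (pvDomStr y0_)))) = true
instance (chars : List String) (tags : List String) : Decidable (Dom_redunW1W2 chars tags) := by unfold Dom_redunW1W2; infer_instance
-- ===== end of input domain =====

-- B compares the W1/W2 character streams lazily with element-wise early exit instead of
-- building both strings, and on equality returns a freshly mapped tag list (alternative
-- algorithm). Python A mutates `tags` in place, Python B returns a new list when the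
-- streams are equal: the equivalence proved here is about the RETURN value only.

-- ===== PORT A =====
def redunW1W2 (chars : List String) (tags : List String) : List String :=
  let strs := (PySem.List.pyRange 0 (tags.length : Int) 1).foldl
    (fun (acc : String × String) index =>
      let acc := if PySem.List.pyGetD tags index "" == "W1" then
          (acc.1 ++ PySem.List.pyGetD chars index "", acc.2) else acc
      if PySem.List.pyGetD tags index "" == "W2" then
          (acc.1, acc.2 ++ PySem.List.pyGetD chars index "") else acc)
    ("", "")
  if strs.1 == strs.2 then
    (PySem.List.pyRange 0 (tags.length : Int) 1).foldl
      (fun ts index =>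
        let ts := if PySem.List.pyGetD ts index "" == "W1" then PySem.List.pySetD ts index "O" else ts
        if PySem.List.pyGetD ts index "" == "W2" then PySem.List.pySetD ts index "D" else ts)
      tags
  else tags

-- ===== PORT B =====
-- The two generator expressions yield exactly these character streams; the while/next loop
-- comparing them element-wise with early exit is the structural recursion pvEqWalk
-- (the `_END` sentinel cases are the length-mismatch patterns).
def pvEqWalk : List Char → List Char → Bool
  | [], [] => true
  | a :: as, b :: bs => if a == b then pvEqWalk as bs else false
  | _, _ => false

def redunW1W2_alt (chars : List String) (tags : List String) : List String :=
  let s1 := ((chars.zip tags).filter (fun p => p.2 == "W1")).flatMap (fun p => p.1.toList)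
  let s2 := ((chars.zip tags).filter (fun p => p.2 == "W2")).flatMap (fun p => p.1.toList)
  if pvEqWalk s1 s2 then
    tags.map (fun t => if t == "W1" then "O" else if t == "W2" then "D" else t)
  else tags

-- ===== PRECONDITION & SPEC =====
-- Python A asserts len(chars)==len(tags) and raises AssertionError otherwise.
def Pre_redunW1W2 (chars : List String) (tags : List String) : Prop :=
  chars.length = tags.length
instance (chars : List String) (tags : List String) : Decidable (Pre_redunW1W2 chars tags) := by
  unfold Pre_redunW1W2; infer_instance
def pvWitness_redunW1W2 : List String × List String := (["a", "b"], ["W1", "W2"])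

def Spec_redunW1W2 (chars : List String) (tags : List String) (out : List String) : Prop := out = redunW1W2_alt chars tags
instance (chars : List String) (tags : List String) (out : List String) : Decidable (Spec_redunW1W2 chars tags out) := by unfold Spec_redunW1W2; infer_instance

-- ===== CLAIM (what is proved, stated in full; the proofs are below) =====
def Claim_equal_redunW1W2 : Prop := ∀ (chars : List String) (tags : List String), Dom_redunW1W2 chars tags → Pre_redunW1W2 chars tags → Spec_redunW1W2 chars tags (redunW1W2 chars tags)

-- ===== LEMMAS AND PROOFS =====

lemma pvEqWalk_iff (a b : List Char) : pvEqWalk a b = true ↔ a = b := by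
  induction a generalizing b with
  | nil => cases b <;> simp [pvEqWalk]
  | cons x xs ih =>
    cases b with
    | nil => simp [pvEqWalk]
    | cons y ys =>
      by_cases h : x = y
      · simp [pvEqWalk, h, ih]
      · simp [pvEqWalk, h]

lemma chars_join_flatten (parts : List (List Char)) :
    PySem.Chars.join [] parts = parts.flatten := by
  induction parts with
  | nil => rfl
  | cons p ps ih =>
    cases ps with
    | nil => simp [PySem.Chars.join_singleton]
    | cons q qs => rw [PySem.Chars.join_cons_cons]; simp_all

lemma join_empty_toList (l : List String) :
    (PySem.Str.join "" l).toList = (l.map String.toList).flatten := by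
  simp [PySem.Str.join, chars_join_flatten]

lemma join_empty_nil : PySem.Str.join "" ([] : List String) = "" := by
  apply String.toList_inj.mp
  simp [join_empty_toList, chars_join_flatten]

lemma join_empty_cons (x : String) (xs : List String) :
    PySem.Str.join "" (x :: xs) = x ++ PySem.Str.join "" xs := by
  apply String.toList_inj.mp
  simp [join_empty_toList, chars_join_flatten]

/-- A's string-building pass, characterised by joins over filters of the enumerate list. -/
lemma foldl_strpair (c : Int → String) (l : List (Int × String)) (s1 s2 : String) :
    l.foldl (fun (acc : String × String) p =>
      let acc := if p.2 == "W1" then (acc.1 ++ c p.1, acc.2) else acc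
      if p.2 == "W2" then (acc.1, acc.2 ++ c p.1) else acc) (s1, s2)
    = (s1 ++ PySem.Str.join "" (((l.filter (fun p => p.2 == "W1")).map (·.1)).map c),
       s2 ++ PySem.Str.join "" (((l.filter (fun p => p.2 == "W2")).map (·.1)).map c)) := by
  induction l generalizing s1 s2 with
  | nil => simp [join_empty_nil]
  | cons p l ih =>
    simp only [List.foldl_cons]
    by_cases h1 : p.2 = "W1"
    · have c1 : (p.2 == "W1") = true := by simp [h1]
      have c2 : (p.2 == "W2") = false := by simp [h1]
      rw [c1, c2, if_neg Bool.false_ne_true, if_pos rfl, ih]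
      simp [h1, join_empty_cons, String.append_assoc]
    · have c1 : (p.2 == "W1") = false := by simp [h1]
      by_cases h2 : p.2 = "W2"
      · have c2 : (p.2 == "W2") = true := by simp [h2]
        rw [c1, c2, if_pos rfl, if_neg Bool.false_ne_true, ih]
        simp [h1, h2, join_empty_cons, String.append_assoc]
      · have c2 : (p.2 == "W2") = false := by simp [h2]
        rw [c1, c2, if_neg Bool.false_ne_true, if_neg Bool.false_ne_true, ih]
        simp [h1, h2]

lemma strsA_eq (chars tags : List String) :
    (PySem.List.pyRange 0 (tags.length : Int) 1).foldl
      (fun (acc : String × String) index =>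
        let acc := if PySem.List.pyGetD tags index "" == "W1" then
            (acc.1 ++ PySem.List.pyGetD chars index "", acc.2) else acc
        if PySem.List.pyGetD tags index "" == "W2" then
            (acc.1, acc.2 ++ PySem.List.pyGetD chars index "") else acc)
      ("", "")
    = (PySem.Str.join "" ((((PySem.List.enumerate tags 0).filter (fun p => p.2 == "W1")).map (·.1)).map (fun i => PySem.List.pyGetD chars i "")),
       PySem.Str.join "" ((((PySem.List.enumerate tags 0).filter (fun p => p.2 == "W2")).map (·.1)).map (fun i => PySem.List.pyGetD chars i ""))) := by
  have he : PySem.List.enumerate tags 0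
      = (PySem.List.pyRange 0 (tags.length : Int) 1).map (fun j => (j, PySem.List.pyGetD tags j "")) :=
    PySem.List.enumerate_eq_map_pyRange tags ""
  have h1 : (PySem.List.pyRange 0 (tags.length : Int) 1).foldl
      (fun (acc : String × String) index =>
        let acc := if PySem.List.pyGetD tags index "" == "W1" then
            (acc.1 ++ PySem.List.pyGetD chars index "", acc.2) else acc
        if PySem.List.pyGetD tags index "" == "W2" then
            (acc.1, acc.2 ++ PySem.List.pyGetD chars index "") else acc)
      ("", "")
      = (PySem.List.enumerate tags 0).foldl
        (fun (acc : String × String) p =>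
          let acc := if p.2 == "W1" then (acc.1 ++ (fun i => PySem.List.pyGetD chars i "") p.1, acc.2) else acc
          if p.2 == "W2" then (acc.1, acc.2 ++ (fun i => PySem.List.pyGetD chars i "") p.1) else acc)
        ("", "") := by
    rw [he, List.foldl_map]
  rw [h1, foldl_strpair (fun i => PySem.List.pyGetD chars i "") (PySem.List.enumerate tags 0) "" ""]
  simp

/-- the chunk strings A reads by index are the chunk strings B reads from the zip. -/
lemma chunks_eq (chars : List String) (lab : String) :
    ∀ (ts cs : List String) (k : Nat), cs.length = ts.length → chars.drop k = cs →
    ((PySem.List.enumerate ts (k : Int)).filter (fun p => p.2 == lab)).map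
        (fun p => PySem.List.pyGetD chars p.1 "")
      = ((cs.zip ts).filter (fun p => p.2 == lab)).map (·.1) := by
  intro ts
  induction ts with
  | nil =>
    intro cs k hlen hdrop
    simp [PySem.List.enumerate]
  | cons t ts ih =>
    intro cs k hlen hdrop
    cases cs with
    | nil => simp at hlen
    | cons c cs' =>
      have hget : PySem.List.pyGetD chars (k : Int) "" = c := by
        have h0 : chars[k]? = some c := by
          have : (chars.drop k)[0]? = some c := by rw [hdrop]; rfl
          simpa [List.getElem?_drop] using this
        simp [PySem.List.pyGetD_natCast, List.getD_eq_getElem?_getD, h0]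
      have hdrop' : chars.drop (k + 1) = cs' := by
        have h1 : List.drop 1 (chars.drop k) = cs' := by rw [hdrop]; rfl
        rw [List.drop_drop] at h1; simpa [Nat.add_comm] using h1
      have hlen' : cs'.length = ts.length := by simpa using hlen
      have hc : (k : Int) + 1 = ((k + 1 : Nat) : Int) := by push_cast; ring
      rw [PySem.List.enumerate_cons, List.zip_cons_cons, hc]
      by_cases h : t = lab
      · simp only [List.filter_cons, h, beq_self_eq_true, if_true, cond_true, List.map_cons, hget]
        rw [ih cs' (k + 1) hlen' hdrop']
      · have hb : (t == lab) = false := by simp [h]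
        simp only [List.filter_cons, hb, cond_false]
        exact ih cs' (k + 1) hlen' hdrop'

/-- the intended relabelling of one tag -/
def relab (t : String) : String := if t == "W1" then "O" else if t == "W2" then "D" else t

lemma set_append_len (pre : List String) (x : String) (rest : List String) (v : String)
    (k : Nat) (hk : pre.length = k) :
    (pre ++ x :: rest).set k v = pre ++ v :: rest := by
  subst hk
  induction pre with
  | nil => rfl
  | cons y ys ih => simp [List.set, ih]

lemma getD_append_len (pre : List String) (x : String) (rest : List String)
    (k : Nat) (hk : pre.length = k) :
    (pre ++ x :: rest).getD k "" = x := by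
  subst hk
  induction pre with
  | nil => rfl
  | cons y ys ih => simpa using ih

/-- A's relabelling loop computes the pointwise relabelling. -/
lemma relabA (tags : List String) : ∀ (fuel k : Nat), k ≤ tags.length → tags.length - k = fuel →
    (PySem.List.pyRange (k : Int) (tags.length : Int) 1).foldl
      (fun ts index =>
        let ts := if PySem.List.pyGetD ts index "" == "W1" then PySem.List.pySetD ts index "O" else ts
        if PySem.List.pyGetD ts index "" == "W2" then PySem.List.pySetD ts index "D" else ts)
      ((tags.take k).map relab ++ tags.drop k)
    = tags.map relab := by
  intro fuel
  induction fuel with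
  | zero =>
    intro k hk hf
    have hek : k = tags.length := by omega
    subst hek
    have hr : PySem.List.pyRange (tags.length : Int) (tags.length : Int) 1 = [] := by
      simp [PySem.List.pyRange]
    simp [hr, List.take_of_length_le (le_refl tags.length),
      List.drop_of_length_le (le_refl tags.length)]
  | succ n ih =>
    intro k hk hf
    have hlt : k < tags.length := by omega
    have hr := PySem.List.pyRange_one_cons (a := (k : Int)) (b := (tags.length : Int)) (by exact_mod_cast hlt)
    rw [hr, List.foldl_cons]
    have hdrop : tags.drop k = tags[k] :: tags.drop (k + 1) := List.drop_eq_getElem_cons hlt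
    have hpre : ((tags.take k).map relab).length = k := by
      simp [List.length_take, Nat.min_eq_left hk]
    have htake : (tags.take (k + 1)).map relab = (tags.take k).map relab ++ [relab tags[k]] := by
      simp only [List.map_take]
      rw [List.take_succ]
      simp [List.getElem?_map, List.getElem?_eq_getElem hlt]
    have hgd : ∀ (x : String) (rest : List String),
        PySem.List.pyGetD ((tags.take k).map relab ++ x :: rest) (k : Int) "" = x := by
      intro x rest
      rw [PySem.List.pyGetD_natCast]
      exact getD_append_len _ x rest k hpre
    have hsd : ∀ (x v : String) (rest : List String),
        PySem.List.pySetD ((tags.take k).map relab ++ x :: rest) (k : Int) v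
          = (tags.take k).map relab ++ v :: rest := by
      intro x v rest
      rw [PySem.List.pySetD_natCast]
      exact set_append_len _ x rest v k hpre
    have hstep : (let ts := if PySem.List.pyGetD ((tags.take k).map relab ++ tags.drop k) (k : Int) "" == "W1"
            then PySem.List.pySetD ((tags.take k).map relab ++ tags.drop k) (k : Int) "O"
            else (tags.take k).map relab ++ tags.drop k
          if PySem.List.pyGetD ts (k : Int) "" == "W2" then PySem.List.pySetD ts (k : Int) "D" else ts)
        = ((tags.take (k + 1)).map relab ++ tags.drop (k + 1)) := by
      rw [hdrop]
      by_cases h1 : tags[k] = "W1"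
      · have c1 : (PySem.List.pyGetD ((tags.take k).map relab ++ tags[k] :: tags.drop (k + 1)) (k : Int) "" == "W1") = true := by
          rw [hgd, h1]; rfl
        rw [c1, if_pos rfl, hsd]
        simp only []
        have c2 : (PySem.List.pyGetD ((tags.take k).map relab ++ "O" :: tags.drop (k + 1)) (k : Int) "" == "W2") = false := by
          rw [hgd]; rfl
        rw [c2, if_neg Bool.false_ne_true, htake, h1]
        simp [relab]
      · have c1 : (PySem.List.pyGetD ((tags.take k).map relab ++ tags[k] :: tags.drop (k + 1)) (k : Int) "" == "W1") = false := by
          rw [hgd]; simp [h1]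
        rw [c1, if_neg Bool.false_ne_true]
        simp only []
        by_cases h2 : tags[k] = "W2"
        · have c2 : (PySem.List.pyGetD ((tags.take k).map relab ++ tags[k] :: tags.drop (k + 1)) (k : Int) "" == "W2") = true := by
            rw [hgd, h2]; rfl
          rw [c2, if_pos rfl, hsd, htake, h2]
          simp [relab]
        · have c2 : (PySem.List.pyGetD ((tags.take k).map relab ++ tags[k] :: tags.drop (k + 1)) (k : Int) "" == "W2") = false := by
            rw [hgd]; simp [h2]
          rw [c2, if_neg Bool.false_ne_true, htake]
          have hrl : relab tags[k] = tags[k] := by simp [relab, h1, h2]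
          rw [hrl]
          simp
    rw [hstep]
    have hc : (k : Int) + 1 = ((k + 1 : Nat) : Int) := by push_cast; ring
    rw [hc]
    exact ih (k + 1) (by omega) (by omega)

/-- the joined chunk string of A and B's flat character stream agree. -/
lemma join_toList_stream (chars tags : List String) (lab : String)
    (h : chars.length = tags.length) :
    (PySem.Str.join "" ((((PySem.List.enumerate tags 0).filter (fun p => p.2 == lab)).map (·.1)).map (fun i => PySem.List.pyGetD chars i ""))).toList
      = ((chars.zip tags).filter (fun p => p.2 == lab)).flatMap (fun p => p.1.toList) := by
  have hmap : (((PySem.List.enumerate tags 0).filter (fun p => p.2 == lab)).map (·.1)).map (fun i => PySem.List.pyGetD chars i "")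
      = ((PySem.List.enumerate tags 0).filter (fun p => p.2 == lab)).map (fun p => PySem.List.pyGetD chars p.1 "") := by
    rw [List.map_map]; rfl
  have hchunks := chunks_eq chars lab tags chars 0 h (by simp)
  rw [hmap, join_empty_toList]
  rw [show ((0 : Nat) : Int) = (0 : Int) from rfl] at hchunks
  rw [hchunks, List.flatMap_def, List.map_map]
  rfl

-- ===== VERDICT (by name: the statement is the Claim_ definition above) =====
theorem redunW1W2_spec : Claim_equal_redunW1W2 := by
  intro chars tags hdom hpre
  unfold Spec_redunW1W2
  show redunW1W2 chars tags = redunW1W2_alt chars tags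
  unfold redunW1W2 redunW1W2_alt
  simp only [strsA_eq]
  have hiff : (PySem.Str.join "" ((((PySem.List.enumerate tags 0).filter (fun p => p.2 == "W1")).map (·.1)).map (fun i => PySem.List.pyGetD chars i ""))
      == PySem.Str.join "" ((((PySem.List.enumerate tags 0).filter (fun p => p.2 == "W2")).map (·.1)).map (fun i => PySem.List.pyGetD chars i "")))
      = pvEqWalk (((chars.zip tags).filter (fun p => p.2 == "W1")).flatMap (fun p => p.1.toList))
                 (((chars.zip tags).filter (fun p => p.2 == "W2")).flatMap (fun p => p.1.toList)) := by
    by_cases hc : ((chars.zip tags).filter (fun p => p.2 == "W1")).flatMap (fun p => p.1.toList)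
        = ((chars.zip tags).filter (fun p => p.2 == "W2")).flatMap (fun p => p.1.toList)
    · rw [(pvEqWalk_iff _ _).mpr hc]
      simp only [beq_iff_eq]
      apply String.toList_inj.mp
      rw [join_toList_stream chars tags "W1" hpre, join_toList_stream chars tags "W2" hpre, hc]
    · have hb : pvEqWalk (((chars.zip tags).filter (fun p => p.2 == "W1")).flatMap (fun p => p.1.toList))
          (((chars.zip tags).filter (fun p => p.2 == "W2")).flatMap (fun p => p.1.toList)) = false := by
        rw [← Bool.not_eq_true]; exact fun h => hc ((pvEqWalk_iff _ _).mp h)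
      rw [hb]
      simp only [beq_eq_false_iff_ne, ne_eq]
      intro h
      apply hc
      rw [← join_toList_stream chars tags "W1" hpre, ← join_toList_stream chars tags "W2" hpre, h]
  rw [hiff]
  split_ifs with h
  · have hA := relabA tags tags.length 0 (by omega) (by omega)
    simp only [Nat.cast_zero, List.take_zero, List.map_nil, List.nil_append, List.drop_zero] at hA
    rw [hA]
    rfl
  · rfl
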